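-- pv_equiv track=rewrite | github.com/romeorizzi/TAlight | example_problems/tutorial/increasing_subseq/services/increasing_subsequence_lib.py | find_ls
-- ===== SOURCE A (Python) =====
-- def find_ls(l):
--     lung = 0
--     index = []
--     ret = []
--     for i in l:
--         if len(i) > lung:
--             index.clear()
--             lung = len(i)
--             index.append(l.index(i))
--         elif len(i) == lung:
--             index.append(l.index(i))
--     for i in index:
--         if (l[i] not in ret):
--             ret.append(l[i])
--     return ret
-- ===== SOURCE B (Python) =====
-- def find_ls(l):
--     groups = {}
--     for x in l:
--         bucket = groups.setdefault(len(x), [])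
--         if x not in bucket:
--             bucket.append(x)
--     if not groups:
--         return []
--     return groups[max(groups)]
-- ===== Notes on version B (the rewrite author's own statement) =====
-- stated objective: alternative
-- what changed: Replaced A's running-max sweep with clear/append of l.index() positions followed by a second dedup pass over those indices by a single pass that groups distinct elements into a dict keyed by length, then returns the bucket of the maximal key (no index bookkeeping, no repeated l.index scans).
import Mathlib
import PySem

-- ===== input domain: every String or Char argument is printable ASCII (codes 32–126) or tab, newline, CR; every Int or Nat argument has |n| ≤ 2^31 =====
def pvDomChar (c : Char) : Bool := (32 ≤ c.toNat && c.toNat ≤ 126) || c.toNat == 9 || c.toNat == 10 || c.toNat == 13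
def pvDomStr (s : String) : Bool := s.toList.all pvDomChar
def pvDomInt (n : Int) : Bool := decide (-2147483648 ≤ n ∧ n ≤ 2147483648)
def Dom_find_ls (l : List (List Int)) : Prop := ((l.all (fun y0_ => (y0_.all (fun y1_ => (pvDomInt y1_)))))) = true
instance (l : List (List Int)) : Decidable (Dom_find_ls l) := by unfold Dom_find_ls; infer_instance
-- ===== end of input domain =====

-- B replaces A's running-max sweep (with its l.index calls) plus final dedup pass by one dict pass
-- grouping distinct elements by length, then returning the bucket of the maximal key (objective: alternative).

-- ===== PORT A =====
-- l.index(i) always succeeds (i ∈ l) and l[j] is always in range (j comes from l.index),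
-- so the `.getD` defaults below are unreachable.
def find_ls (l : List (List Int)) : List (List Int) :=
  let s := l.foldl (fun (s : Nat × List Nat) i =>
      if i.length > s.1 then (i.length, [(PySem.List.index? l i).getD 0])
      else if i.length = s.1 then (s.1, s.2 ++ [(PySem.List.index? l i).getD 0])
      else s) (0, [])
  s.2.foldl (fun ret j =>
      let v := (PySem.List.pyGet? l ((j : Nat) : Int)).getD []
      if v ∈ ret then ret else ret ++ [v]) []

-- ===== PORT B =====
-- Python's `setdefault(len(x), [])` inserts the key with an empty bucket exactly when it is
-- absent, in which case `x not in bucket` holds; so the conditional insert below yields the same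
-- dict. `if not groups: return []` together with `max(groups)` is the match on max? of the keys
-- (max? is none exactly on the empty dict).
def find_ls_alt (l : List (List Int)) : List (List Int) :=
  let groups := l.foldl (fun (g : PySem.Dict Nat (List (List Int))) x =>
      let bucket := g.getD x.length []
      if x ∈ bucket then g else g.insert x.length (bucket ++ [x]))
    PySem.Dict.empty
  match PySem.List.max? groups.keys (fun k => k) with
  | none => []
  | some m => groups.getD m []

-- ===== PRECONDITION & SPEC =====
def Spec_find_ls (l : List (List Int)) (out : List (List Int)) : Prop := out = find_ls_alt l
instance (l : List (List Int)) (out : List (List Int)) : Decidable (Spec_find_ls l out) := by unfold Spec_find_ls; infer_instance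

-- ===== CLAIM (what is proved, stated in full; the proofs are below) =====
def Claim_equal_find_ls : Prop := ∀ (l : List (List Int)), Dom_find_ls l → Spec_find_ls l (find_ls l)

-- ===== LEMMAS AND PROOFS =====

-- first-occurrence dedup, the common shape of A's second loop and B's buckets
def pvDedup (acc xs : List (List Int)) : List (List Int) :=
  xs.foldl (fun r v => if v ∈ r then r else r ++ [v]) acc

def pvMaxLen (l : List (List Int)) : Nat := l.foldl (fun m x => max m x.length) 0

theorem pv_val_of_index (l : List (List Int)) (i : List Int) (h : i ∈ l) :
    (PySem.List.pyGet? l (((PySem.List.index? l i).getD 0 : Nat) : Int)).getD [] = i := by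
  obtain ⟨k, hk⟩ := Option.isSome_iff_exists.mp ((PySem.List.index?_isSome_iff l i).mpr h)
  obtain ⟨hlt, hval, -⟩ := PySem.List.getElem_of_index?_eq_some hk
  rw [hk]
  simp [PySem.List.pyGet?_natCast, List.getElem?_eq_getElem hlt, hval]

-- A's first loop: final lung is the running max of lengths; final index holds the indices of the
-- elements of maximal length (prefixed by the incoming index list iff the max does not move).
theorem pv_loopA (l : List (List Int)) :
    ∀ (rest : List (List Int)) (lung : Nat) (index : List Nat),
      rest.foldl (fun (s : Nat × List Nat) i =>
        if i.length > s.1 then (i.length, [(PySem.List.index? l i).getD 0])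
        else if i.length = s.1 then (s.1, s.2 ++ [(PySem.List.index? l i).getD 0])
        else s) (lung, index)
      = (rest.foldl (fun m x => max m x.length) lung,
         (if rest.foldl (fun m x => max m x.length) lung = lung then index else []) ++
           (rest.filter (fun x => x.length = rest.foldl (fun m x => max m x.length) lung)).map
             (fun i => (PySem.List.index? l i).getD 0)) := by
  intro rest
  induction rest with
  | nil => simp
  | cons x t ih =>
    intro lung index
    have hle : ∀ (a : Nat), a ≤ t.foldl (fun m x => max m x.length) a :=
      fun a => (PySem.List.le_foldl_max_nat t List.length a).1
    simp only [List.foldl_cons]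
    by_cases h1 : x.length > lung
    · simp only [if_pos h1]
      rw [ih]
      have hmax : max lung x.length = x.length := by omega
      have hM : t.foldl (fun m x => max m x.length) x.length ≠ lung := by
        have := hle x.length; omega
      simp only [hmax]
      simp only [if_neg hM, List.nil_append, List.filter_cons]
      by_cases h2 : x.length = t.foldl (fun m x => max m x.length) x.length
      · rw [if_pos h2.symm, if_pos (decide_eq_true h2)]
        simp
      · have : ¬ (decide (x.length = t.foldl (fun m x => max m x.length) x.length) = true) := by
          simp [h2]
        simp only [if_neg this]
        by_cases h3 : t.foldl (fun m y => max m y.length) x.length = x.length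
        · exact absurd h3.symm h2
        · simp [h3]
    · simp only [if_neg h1]
      by_cases h2 : x.length = lung
      · simp only [if_pos h2]
        rw [ih]
        have hmax : max lung x.length = lung := by omega
        simp only [hmax]
        by_cases h3 : t.foldl (fun m x => max m x.length) lung = lung
        · simp [h3, h2, List.append_assoc]
        · have h4 : x.length ≠ t.foldl (fun m x => max m x.length) lung := by
            rw [h2]; exact fun hh => h3 hh.symm
          simp [h3, h4]
      · simp only [if_neg h2]
        rw [ih]
        have hmax : max lung x.length = lung := by omega
        simp only [hmax]
        have h4 : x.length ≠ t.foldl (fun m x => max m x.length) lung := by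
          have := hle lung; omega
        simp [h4]

theorem pv_A_eq_ref (l : List (List Int)) :
    find_ls l = pvDedup [] (l.filter (fun x => x.length = pvMaxLen l)) := by
  unfold find_ls
  simp only []
  rw [pv_loopA l l 0 []]
  have hif : (if l.foldl (fun m x => max m x.length) 0 = 0 then ([] : List Nat) else []) = [] := by
    split <;> rfl
  rw [hif, List.nil_append, List.foldl_map]
  rw [PySem.List.foldl_congr_mem _ _
    (fun (ret : List (List Int)) (i : List Int) => if i ∈ ret then ret else ret ++ [i]) []
    (fun acc i hi => by
      have hil : i ∈ l := List.mem_of_mem_filter hi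
      simp only [pv_val_of_index l i hil])]
  rfl

theorem pv_loopB_getD (p : List (List Int)) :
    ∀ (g : PySem.Dict Nat (List (List Int))) (L : Nat),
      (p.foldl (fun g x =>
          let bucket := g.getD x.length []
          if x ∈ bucket then g else g.insert x.length (bucket ++ [x])) g).getD L []
      = pvDedup (g.getD L []) (p.filter (fun x => x.length = L)) := by
  induction p with
  | nil => intro g L; simp [pvDedup]
  | cons x t ih =>
    intro g L
    simp only [List.foldl_cons, List.filter_cons]
    by_cases hmem : x ∈ g.getD x.length []
    · simp only [if_pos hmem]
      rw [ih]
      by_cases hL : x.length = L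
      · rw [if_pos (decide_eq_true hL)]
        subst hL
        simp [pvDedup, hmem]
      · rw [if_neg (by simp [hL])]
    · simp only [if_neg hmem]
      rw [ih]
      by_cases hL : x.length = L
      · rw [if_pos (decide_eq_true hL)]
        subst hL
        simp [pvDedup, PySem.Dict.getD_insert_self, hmem]
      · rw [if_neg (by simp [hL]), PySem.Dict.getD_insert_of_ne _ _ _ (fun h => hL h.symm)]

theorem pv_loopB_keys (p : List (List Int)) :
    ∀ (g : PySem.Dict Nat (List (List Int))) (k : Nat),
      (k ∈ (p.foldl (fun g x =>
          let bucket := g.getD x.length []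
          if x ∈ bucket then g else g.insert x.length (bucket ++ [x])) g).keys)
      ↔ (k ∈ g.keys ∨ ∃ x ∈ p, x.length = k) := by
  induction p with
  | nil => simp
  | cons x t ih =>
    intro g k
    simp only [List.foldl_cons]
    by_cases hmem : x ∈ g.getD x.length []
    · have hk : x.length ∈ g.keys := by
        by_contra hc
        have : g.contains x.length = false := by
          cases h : g.contains x.length
          · rfl
          · exact absurd ((PySem.Dict.contains_iff_mem_keys g x.length).mp h) hc
        rw [PySem.Dict.getD_of_not_contains g _ this] at hmem
        exact absurd hmem (List.not_mem_nil)
      simp only [if_pos hmem]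
      rw [ih]
      constructor
      · rintro (h | h)
        · exact Or.inl h
        · exact Or.inr ⟨h.choose, List.mem_cons_of_mem _ h.choose_spec.1, h.choose_spec.2⟩
      · rintro (h | ⟨y, hy, hyl⟩)
        · exact Or.inl h
        · rcases List.mem_cons.mp hy with rfl | hy'
          · exact Or.inl (hyl ▸ hk)
          · exact Or.inr ⟨y, hy', hyl⟩
    · simp only [if_neg hmem]
      rw [ih]
      simp only [PySem.Dict.mem_keys_insert]
      constructor
      · rintro (⟨h | h⟩ | h)
        · exact Or.inr ⟨x, List.mem_cons_self, h.symm⟩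
        · exact Or.inl h
        · exact Or.inr ⟨h.choose, List.mem_cons_of_mem _ h.choose_spec.1, h.choose_spec.2⟩
      · rintro (h | ⟨y, hy, hyl⟩)
        · exact Or.inl (Or.inr h)
        · rcases List.mem_cons.mp hy with rfl | hy'
          · exact Or.inl (Or.inl hyl.symm)
          · exact Or.inr ⟨y, hy', hyl⟩

theorem pv_B_eq_ref (l : List (List Int)) :
    find_ls_alt l = pvDedup [] (l.filter (fun x => x.length = pvMaxLen l)) := by
  unfold find_ls_alt
  simp only []
  set g := l.foldl (fun (g : PySem.Dict Nat (List (List Int))) x =>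
      let bucket := g.getD x.length []
      if x ∈ bucket then g else g.insert x.length (bucket ++ [x])) PySem.Dict.empty with hg
  have hkeys : ∀ k, k ∈ g.keys ↔ ∃ x ∈ l, x.length = k := by
    intro k
    rw [hg, pv_loopB_keys l PySem.Dict.empty k]
    simp [PySem.Dict.keys_empty]
  cases l with
  | nil =>
    have : g.keys = [] := by
      cases h : g.keys with
      | nil => rfl
      | cons a t =>
        exact absurd ((hkeys a).mp (h ▸ List.mem_cons_self)) (by simp)
    rw [(PySem.List.max?_eq_none_iff g.keys (fun k => k)).mpr this]
    simp [pvDedup]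
  | cons x t =>
    -- the dict is non-empty, so max? returns the maximal key, which is pvMaxLen (x :: t)
    have hxk : x.length ∈ g.keys := (hkeys x.length).mpr ⟨x, List.mem_cons_self, rfl⟩
    have hne : g.keys ≠ [] := fun h => by rw [h] at hxk; exact absurd hxk (List.not_mem_nil)
    cases hm : PySem.List.max? g.keys (fun k => k) with
    | none => exact absurd ((PySem.List.max?_eq_none_iff _ _).mp hm) hne
    | some m =>
    have hub : ∀ y ∈ (x :: t), y.length ≤ pvMaxLen (x :: t) :=
      (PySem.List.le_foldl_max_nat (x :: t) List.length 0).2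
    have hmem_max : pvMaxLen (x :: t) ∈ g.keys := by
      have hre : pvMaxLen (x :: t) = ((x :: t).map List.length).foldl max 0 := by
        rw [List.foldl_map]; rfl
      rcases PySem.List.foldl_max_mem ((x :: t).map List.length) 0 with h0 | hmm
      · -- the max is 0: then x.length = 0 is a witness length
        have hx0 : x.length = pvMaxLen (x :: t) := by
          have := hub x List.mem_cons_self
          rw [hre, h0]; rw [hre, h0] at this; omega
        exact (hkeys _).mpr ⟨x, List.mem_cons_self, hx0⟩
      · rw [← hre] at hmm
        obtain ⟨y, hy, hyl⟩ := List.mem_map.mp hmm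
        exact (hkeys _).mpr ⟨y, hy, hyl⟩
    have h1 : pvMaxLen (x :: t) ≤ m := PySem.List.max?_isMax hm _ hmem_max
    have h2 : m ≤ pvMaxLen (x :: t) := by
      obtain ⟨y, hy, hyl⟩ := (hkeys m).mp (PySem.List.max?_mem hm)
      exact hyl ▸ hub y hy
    have hmeq : m = pvMaxLen (x :: t) := le_antisymm h2 h1
    show (List.foldl (fun g x =>
        let bucket := g.getD x.length []
        if x ∈ bucket then g else g.insert x.length (bucket ++ [x]))
        PySem.Dict.empty (x :: t)).getD m [] = _
    rw [pv_loopB_getD (x :: t) PySem.Dict.empty m, PySem.Dict.getD_empty, hmeq]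

-- ===== VERDICT (by name: the statement is the Claim_ definition above) =====
theorem find_ls_spec : Claim_equal_find_ls := by
  intro l _
  unfold Spec_find_ls
  rw [pv_A_eq_ref, pv_B_eq_ref]
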